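-- pv_equiv track=rewrite | github.com/lalapopa/diamond_mosaic | diamond_mosaic/make_colors.py | two_value_coding
-- ===== SOURCE A (Python) =====
-- import math
--
-- def two_value_coding(i):
--     symbols = [
--         "A",
--         "B",
--         "C",
--         "D",
--         "E",
--         "F",
--         "9",
--         "J",
--         "K",
--         "L",
--         "M",
--         "N",
--         "P",
--         "4",
--         "R",
--         "S",
--         "T",
--         "U",
--         "V",
--         "W",
--         "X",
--         "Y",
--         "Z",
--         "1",
--         "2",
--     ]
--
--     k = 2
--     n = len(symbols)
--
--     max_combination = math.factorial(n) / math.factorial(n - k)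
--     if i > max_combination or i <= 0:
--         raise Exception(
--             f"That number in array can't be without repetition. Should be: 0 < {i} <={max_combination}"
--         )
--
--     array = []
--     for j in symbols:
--         array.append([str(i) + str(j) for i in symbols if i != j])
--     x_value = i // n
--     y_value = i % n
--
--     return array[y_value][x_value - 1]
-- ===== SOURCE B (Python) =====
-- import math
--
-- def two_value_coding(i):
--     symbols = [
--         "A", "B", "C", "D", "E", "F", "9", "J", "K", "L", "M", "N", "P",
--         "4", "R", "S", "T", "U", "V", "W", "X", "Y", "Z", "1", "2",
--     ]
--     k = 2
--     n = len(symbols)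
--     max_combination = math.factorial(n) / math.factorial(n - k)
--     if i > max_combination or i <= 0:
--         raise Exception(
--             f"That number in array can't be without repetition. Should be: 0 < {i} <={max_combination}"
--         )
--     outer = symbols[i % n]
--     filtered = [s for s in symbols if s != outer]
--     return filtered[i // n - 1] + outer
-- ===== Notes on version B (the rewrite author's own statement) =====
-- stated objective: simpler
-- what changed: Instead of building A's full 25x24 table of concatenated pairs and double-indexing it, B picks the outer symbol directly as symbols[i % n], builds only the one filtered row it needs, and indexes it once (the -1 case falls through naturally).
import Mathlib
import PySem

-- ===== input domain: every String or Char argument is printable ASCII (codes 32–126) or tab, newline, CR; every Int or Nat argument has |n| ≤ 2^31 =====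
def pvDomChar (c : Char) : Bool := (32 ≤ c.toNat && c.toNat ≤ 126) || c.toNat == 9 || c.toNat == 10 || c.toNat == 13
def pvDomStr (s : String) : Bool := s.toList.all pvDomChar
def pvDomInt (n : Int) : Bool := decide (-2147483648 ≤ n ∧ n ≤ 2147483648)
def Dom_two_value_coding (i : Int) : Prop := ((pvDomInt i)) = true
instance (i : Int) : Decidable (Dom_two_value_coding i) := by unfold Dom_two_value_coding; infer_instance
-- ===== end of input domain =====

-- B skips A's full 25x24 pair table: it picks the outer symbol directly and builds only
-- the single filtered row it indexes into (objective: simpler).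


-- ===== PORT A =====
def pvSymbols : List String :=
  ["A","B","C","D","E","F","9","J","K","L","M","N","P","4","R","S","T","U","V","W","X","Y","Z","1","2"]

-- literal port of A; str(x) on a str is the identity, so 'str(i) + str(j)' is '++'.
-- The `.getD ""` default is never taken inside Pre_ (both indexings are in range there),
-- and the explicit range check that raises is exactly what Pre_ excludes.
def two_value_coding (i : Int) : String :=
  let symbols := pvSymbols
  let n : Int := symbols.length
  -- array.append([str(i)+str(j) for i in symbols if i != j]) for j in symbols
  let array : List (List String) :=
    symbols.foldl (fun acc j => acc ++ [(symbols.filter (fun s => s != j)).map (fun s => s ++ j)]) []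
  let x_value := PySem.Int.floordiv i n
  let y_value := PySem.Int.mod i n
  ((PySem.List.pyGet? array y_value).bind (fun row => PySem.List.pyGet? row (x_value - 1))).getD ""

-- ===== PORT B =====
-- same validation as A (Pre_ excludes the raise); negative index -1 (when i // n == 0)
-- falls through to the last element exactly as in Python
def two_value_coding_alt (i : Int) : String :=
  let symbols := pvSymbols
  let n : Int := symbols.length
  let outer := (PySem.List.pyGet? symbols (PySem.Int.mod i n)).getD ""
  let filtered := symbols.filter (fun s => s != outer)
  (PySem.List.pyGet? filtered (PySem.Int.floordiv i n - 1)).getD "" ++ outer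

-- ===== PRECONDITION & SPEC =====
-- A raises its explicit range check unless 0 < i ≤ 600 (= 25!/23!); Pre_ admits exactly the inputs A returns on.
def Pre_two_value_coding (i : Int) : Prop := 0 < i ∧ i ≤ 600
instance (i : Int) : Decidable (Pre_two_value_coding i) := by unfold Pre_two_value_coding; infer_instance
def pvWitness_two_value_coding : Int := (7)

def Spec_two_value_coding (i : Int) (out : String) : Prop := out = two_value_coding_alt i
instance (i : Int) (out : String) : Decidable (Spec_two_value_coding i out) := by unfold Spec_two_value_coding; infer_instance

-- ===== CLAIM (what is proved, stated in full; the proofs are below) =====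
def Claim_equal_two_value_coding : Prop := ∀ (i : Int), Dom_two_value_coding i → Pre_two_value_coding i → Spec_two_value_coding i (two_value_coding i)

-- ===== LEMMAS AND PROOFS =====
-- pyGet? commutes with map (both Python indexings read the same position)
theorem pyGet?_map {α β : Type} (f : α → β) (l : List α) (k : Int) :
    PySem.List.pyGet? (l.map f) k = (PySem.List.pyGet? l k).map f := by
  simp [PySem.List.pyGet?, PySem.List.pyIdx?]

-- each filtered row of A's table has exactly 24 entries
theorem len_filter_row : ∀ j ∈ pvSymbols, (pvSymbols.filter (fun s => s != j)).length = 24 := by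
  decide

-- ===== VERDICT =====
theorem two_value_coding_spec : Claim_equal_two_value_coding := by
  intro i _ hPre
  obtain ⟨h1, h2⟩ := hPre
  unfold Spec_two_value_coding two_value_coding two_value_coding_alt
  have hlen : pvSymbols.length = 25 := rfl
  simp only [PySem.List.foldl_append_singleton_eq_map, List.nil_append, hlen]
  rw [PySem.Int.mod_eq_emod_of_pos (by norm_num : (0:Int) < ((25:Nat):Int)),
      PySem.Int.floordiv_eq_ediv_of_pos (by norm_num : (0:Int) < ((25:Nat):Int))]
  simp only [Nat.cast_ofNat]
  have hrnn : 0 ≤ i % (25:Int) := Int.emod_nonneg i (by norm_num)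
  have hrlt : i % (25:Int) < 25 := Int.emod_lt_of_pos i (by norm_num)
  have hm : (i % (25:Int)).toNat < pvSymbols.length := by rw [hlen]; omega
  rw [pyGet?_map, PySem.List.pyGet?_of_nonneg _ hrnn, List.getElem?_eq_getElem hm]
  set outer := pvSymbols[(i % (25:Int)).toNat] with houter
  have hmem : outer ∈ pvSymbols := List.getElem_mem hm
  have hrow : (pvSymbols.filter (fun s => s != outer)).length = 24 := len_filter_row outer hmem
  -- the inner index is always in range: 0 ≤ i / 25 ≤ 24, so -1 ≤ i/25 - 1 ≤ 23
  have hq1 : 0 ≤ i / (25:Int) := Int.ediv_nonneg (by omega) (by norm_num)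
  have hq2 : i / (25:Int) ≤ 24 := by omega
  have hin : PySem.Raise.InRange (pvSymbols.filter (fun s => s != outer)).length (i / 25 - 1) := by
    rw [hrow]
    simp only [PySem.Raise.InRange]
    omega
  have hsome : PySem.List.pyGet? (pvSymbols.filter (fun s => s != outer)) (i / 25 - 1) ≠ none := by
    rw [Ne, PySem.List.pyGet?_eq_none_iff]
    exact fun h => h hin
  obtain ⟨v, hv⟩ := Option.ne_none_iff_exists'.mp hsome
  simp [pyGet?_map, hv]
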